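-- pv_equiv track=rewrite | github.com/valenca/Evolutionary-Computation-Engine | 2/5.py | brandao
-- ===== SOURCE A (Python) =====
-- def brandao(individual):
-- 	k = 0;
-- 	for i in range(len(individual)):
-- 		if individual[i] == 1:
-- 			for j in range(1,min(i+1, len(individual)-i),1):
-- 				if individual[i-j] == individual[i+j] == 1:
-- 					k+=1
-- 					break
-- 	return 100-sum(individual)+k*2
-- ===== SOURCE B (Python) =====
-- def brandao(individual):
--     n = len(individual)
--     ones = [i for i in range(n) if individual[i] == 1]
--     centers = {p + q for p in ones for q in ones if p < q}
--     k = sum(1 for i in ones if 2 * i in centers)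
--     return 100 - sum(individual) + 2 * k
-- ===== Notes on version B (the rewrite author's own statement) =====
-- stated objective: alternative
-- what changed: Instead of scanning, for each 1-position, all candidate offsets j outward, B collects the 1-positions once, builds the set of sums p+q of ordered pairs of 1-positions, and counts the 1-positions i with 2*i in that set.
import Mathlib
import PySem

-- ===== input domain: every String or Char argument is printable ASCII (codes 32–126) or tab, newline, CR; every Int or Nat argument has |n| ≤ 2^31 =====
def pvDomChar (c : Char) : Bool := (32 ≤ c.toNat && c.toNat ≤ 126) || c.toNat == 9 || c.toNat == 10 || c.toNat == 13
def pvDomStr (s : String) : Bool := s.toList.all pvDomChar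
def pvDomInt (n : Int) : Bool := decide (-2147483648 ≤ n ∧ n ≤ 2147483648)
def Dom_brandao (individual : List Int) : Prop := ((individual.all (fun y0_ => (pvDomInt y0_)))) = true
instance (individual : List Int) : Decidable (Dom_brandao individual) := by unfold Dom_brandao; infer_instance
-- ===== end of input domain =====

-- B replaces A's per-center outward scan by collecting the 1-positions once and testing, per
-- 1-position i, membership of 2*i in the set of pair sums of 1-positions (objective: alternative).

-- ===== PORT A =====
-- inner loop 'for j in range(1, min(i+1, n-i), 1): if xs[i-j] == xs[i+j] == 1: k+=1; break'
-- as a recursion over the range list that stops at the first hit (the break)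
def brandaoInner (xs : List Int) (i : Int) : List Int → Bool
  | [] => false
  | j :: rest =>
    if PySem.List.pyGet? xs (i - j) == some 1 && PySem.List.pyGet? xs (i + j) == some 1 then
      true
    else brandaoInner xs i rest

def brandao (individual : List Int) : Int :=
  let n : Int := individual.length
  let k : Int := (PySem.List.pyRange 0 n 1).foldl
    (fun k i =>
      if PySem.List.pyGet? individual i == some 1 then
        if brandaoInner individual i (PySem.List.pyRange 1 (min (i + 1) (n - i)) 1) then k + 1
        else k
      else k) 0
  100 - individual.sum + k * 2

-- ===== PORT B =====
-- ones = [i for i in range(n) if individual[i] == 1]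
def brandaoOnes (individual : List Int) : List Int :=
  (PySem.List.pyRange 0 individual.length 1).filter
    (fun i => PySem.List.pyGet? individual i == some 1)

-- centers = {p + q for p in ones for q in ones if p < q}
def brandaoCenters (ones : List Int) : PySem.Set Int :=
  PySem.Set.ofList (ones.flatMap (fun p => (ones.filter (fun q => p < q)).map (fun q => p + q)))

def brandao_alt (individual : List Int) : Int :=
  let ones := brandaoOnes individual
  let centers := brandaoCenters ones
  let k : Int := ((ones.filter (fun i => PySem.Set.contains centers (2 * i))).length : Int)
  100 - individual.sum + 2 * k

-- ===== PRECONDITION & SPEC =====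
def Spec_brandao (individual : List Int) (out : Int) : Prop := out = brandao_alt individual
instance (individual : List Int) (out : Int) : Decidable (Spec_brandao individual out) := by unfold Spec_brandao; infer_instance

-- ===== CLAIM (what is proved, stated in full; the proofs are below) =====
def Claim_equal_brandao : Prop := ∀ (individual : List Int), Dom_brandao individual → Spec_brandao individual (brandao individual)

-- ===== LEMMAS AND PROOFS =====

-- A's counting loop is the length of a double filter
lemma brandao_foldl_count (g f : Int → Bool) (l : List Int) (k0 : Int) :
    l.foldl (fun k i => if g i then (if f i then k + 1 else k) else k) k0
      = k0 + (((l.filter g).filter f).length : Int) := by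
  induction l generalizing k0 with
  | nil => simp
  | cons x t ih =>
      by_cases hg : g x <;> by_cases hf : f x <;>
        simp [hg, hf, ih] <;> omega

-- the break-on-first-hit loop returns whether any j hits
lemma brandaoInner_eq_any (xs : List Int) (i : Int) (js : List Int) :
    brandaoInner xs i js
      = js.any (fun j => PySem.List.pyGet? xs (i - j) == some 1
                        && PySem.List.pyGet? xs (i + j) == some 1) := by
  induction js with
  | nil => rfl
  | cons j t ih =>
      simp only [brandaoInner, List.any_cons]
      split_ifs with h
      · simp [h]
      · simp only [ih]
        cases hc : (PySem.List.pyGet? xs (i - j) == some 1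
                    && PySem.List.pyGet? xs (i + j) == some 1) with
        | true => exact absurd hc h
        | false => simp

lemma mem_brandaoOnes (xs : List Int) (p : Int) :
    p ∈ brandaoOnes xs
      ↔ (0 ≤ p ∧ p < (xs.length : Int)) ∧ PySem.List.pyGet? xs p = some 1 := by
  simp [brandaoOnes, List.mem_filter, PySem.List.mem_pyRange_one, and_assoc]

lemma contains_brandaoCenters (l : List Int) (s : Int) :
    PySem.Set.contains (brandaoCenters l) s = true
      ↔ ∃ p ∈ l, ∃ q ∈ l, p < q ∧ p + q = s := by
  rw [PySem.Set.contains_iff]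
  simp [brandaoCenters, PySem.Set.mem_ofList, List.mem_flatMap, List.mem_filter,
        List.mem_map]
  constructor
  · rintro ⟨p, hp, q, ⟨hq, hlt⟩, hs⟩
    exact ⟨p, hp, q, hq, hlt, hs⟩
  · rintro ⟨p, hp, q, hq, hlt, hs⟩
    exact ⟨p, hp, q, ⟨hq, hlt⟩, hs⟩

-- pointwise: for a 1-position i, A's inner scan succeeds iff 2*i is a pair sum of 1-positions
lemma brandao_found_iff (xs : List Int) (i : Int) (hi : i ∈ brandaoOnes xs) :
    brandaoInner xs i
        (PySem.List.pyRange 1 (min (i + 1) ((xs.length : Int) - i)) 1)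
      = PySem.Set.contains (brandaoCenters (brandaoOnes xs)) (2 * i) := by
  obtain ⟨⟨hi0, hin⟩, _⟩ := (mem_brandaoOnes xs i).1 hi
  rw [Bool.eq_iff_iff, brandaoInner_eq_any, List.any_eq_true, contains_brandaoCenters]
  constructor
  · rintro ⟨j, hj, hget⟩
    rw [PySem.List.mem_pyRange_one] at hj
    rw [Bool.and_eq_true, beq_iff_eq, beq_iff_eq] at hget
    refine ⟨i - j, ?_, i + j, ?_, by omega, by omega⟩
    · exact (mem_brandaoOnes xs _).2 ⟨⟨by omega, by omega⟩, hget.1⟩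
    · exact (mem_brandaoOnes xs _).2 ⟨⟨by omega, by omega⟩, hget.2⟩
  · rintro ⟨p, hp, q, hq, hlt, hs⟩
    obtain ⟨⟨hp0, hpn⟩, hpg⟩ := (mem_brandaoOnes xs p).1 hp
    obtain ⟨⟨hq0, hqn⟩, hqg⟩ := (mem_brandaoOnes xs q).1 hq
    refine ⟨i - p, ?_, ?_⟩
    · rw [PySem.List.mem_pyRange_one]; omega
    · rw [Bool.and_eq_true, beq_iff_eq, beq_iff_eq]
      constructor
      · have : i - (i - p) = p := by omega
        rw [this]; exact hpg
      · have : i + (i - p) = q := by omega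
        rw [this]; exact hqg

-- ===== VERDICT (by name: the statement is the Claim_ definition above) =====
theorem brandao_spec : Claim_equal_brandao := by
  intro xs _
  unfold Spec_brandao brandao brandao_alt
  simp only []
  rw [brandao_foldl_count
        (fun i => PySem.List.pyGet? xs i == some 1)
        (fun i => brandaoInner xs i
          (PySem.List.pyRange 1 (min (i + 1) ((xs.length : Int) - i)) 1))]
  have hones : (PySem.List.pyRange 0 (xs.length : Int) 1).filter
      (fun i => PySem.List.pyGet? xs i == some 1) = brandaoOnes xs := rfl
  rw [hones,
      List.filter_congr (fun i hi => brandao_found_iff xs i hi)]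
  ring
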